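-- pv_equiv track=rewrite | github.com/shahinmnm/Poker-Bot | pokerapp/winnerdetermination.py | _group_hand
-- ===== SOURCE A (Python) =====
-- from typing import Dict, List, Optional, Tuple
--
-- def _group_hand(hand_values: List[int]) -> Tuple[List[int], List[int]]:
--     dict_hand = {}
--     for i in hand_values:
--         if i not in dict_hand:
--             dict_hand[i] = 0
--         dict_hand[i] += 1
--
--     sorted_dict_items = sorted(
--         dict_hand.items(),
--         key=lambda x: x[1],
--     )
--
--     hand_values = list(map(lambda x: x[1], sorted_dict_items))
--     hand_keys = list(map(lambda x: x[0], sorted_dict_items))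
--     return (hand_values, hand_keys)
-- ===== SOURCE B (Python) =====
-- def _group_hand(hand_values):
--     counts = {}
--     for v in hand_values:
--         counts[v] = counts.get(v, 0) + 1
--     maxc = 0
--     for n in counts.values():
--         maxc = max(maxc, n)
--     out_counts = []
--     out_keys = []
--     for c in range(1, maxc + 1):
--         for k, n in counts.items():
--             if n == c:
--                 out_counts.append(c)
--                 out_keys.append(k)
--     return (out_counts, out_keys)
-- ===== Notes on version B (the rewrite author's own statement) =====
-- stated objective: alternative
-- what changed: Replaces the comparison sort of the (value,count) items by a counting sweep: compute the maximum count, then for each frequency c = 1..maxc emit the keys with that count in dict insertion order, reproducing the stable-sort tie order without sorting.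
import Mathlib
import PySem

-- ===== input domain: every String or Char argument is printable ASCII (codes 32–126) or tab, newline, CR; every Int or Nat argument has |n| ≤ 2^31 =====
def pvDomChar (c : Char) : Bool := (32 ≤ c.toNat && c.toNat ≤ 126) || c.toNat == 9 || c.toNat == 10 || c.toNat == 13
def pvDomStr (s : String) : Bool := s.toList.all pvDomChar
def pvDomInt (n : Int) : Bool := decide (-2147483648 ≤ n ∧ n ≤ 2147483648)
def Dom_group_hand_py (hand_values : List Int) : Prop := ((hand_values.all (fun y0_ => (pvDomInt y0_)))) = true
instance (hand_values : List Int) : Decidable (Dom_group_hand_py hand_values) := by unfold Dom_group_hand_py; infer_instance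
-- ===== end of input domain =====

-- B replaces the stable sort of the (value, count) items by a counting sweep over the frequencies 1..max count (objective: alternative).

-- ===== PORT A =====
def group_hand_py (hand_values : List Int) : List Int × List Int :=
  let dict_hand : PySem.Dict Int Int := hand_values.foldl
    (fun d i => (if d.contains i then d else d.insert i 0).modify i 0 (· + 1))
    PySem.Dict.empty
  let sorted_dict_items := PySem.List.sorted dict_hand.items (fun x => x.2) false
  (sorted_dict_items.map (fun x => x.2), sorted_dict_items.map (fun x => x.1))

-- ===== PORT B =====
def group_hand_py_alt (hand_values : List Int) : List Int × List Int :=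
  let counts : PySem.Dict Int Int := hand_values.foldl
    (fun d v => d.insert v (d.getD v 0 + 1)) PySem.Dict.empty
  let maxc := counts.values.foldl (fun m n => max m n) 0
  (PySem.List.pyRange 1 (maxc + 1)).foldl
    (fun out c =>
      counts.items.foldl
        (fun out kn => if kn.2 == c then (out.1 ++ [c], out.2 ++ [kn.1]) else out)
        out)
    ([], [])

-- ===== PRECONDITION & SPEC =====
def Spec_group_hand_py (hand_values : List Int) (out : List Int × List Int) : Prop := out = group_hand_py_alt hand_values
instance (hand_values : List Int) (out : List Int × List Int) : Decidable (Spec_group_hand_py hand_values out) := by unfold Spec_group_hand_py; infer_instance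

-- ===== CLAIM (what is proved, stated in full; the proofs are below) =====
def Claim_equal_group_hand_py : Prop := ∀ (hand_values : List Int), Dom_group_hand_py hand_values → Spec_group_hand_py hand_values (group_hand_py hand_values)

-- ===== LEMMAS AND PROOFS =====

-- A's counting loop builds Counter(hand_values)
lemma dictA_eq_counter (l : List Int) :
    l.foldl (fun d i => (if d.contains i then d else d.insert i 0).modify i 0 (· + 1))
      PySem.Dict.empty = PySem.Dict.counter l := by
  rw [← PySem.Dict.foldl_insert_getD_add_one_eq_counter]
  apply PySem.List.foldl_congr_mem
  intro d i _
  by_cases h : d.contains i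
  · simp [h, PySem.Dict.modify]
  · have h0 : d.getD i 0 = 0 := PySem.Dict.getD_of_not_contains d 0 (by simpa using h)
    simp [h, PySem.Dict.modify, PySem.Dict.getD_insert_self, PySem.Dict.insert_insert_self, h0]

-- inserting x into A ++ B where A's keys are ≤ key x and B's keys are > key x
lemma insertBy_split {α : Type} (key : α → Int) (x : α) (A B : List α)
    (hA : ∀ a ∈ A, ¬ (key x < key a)) (hB : ∀ b ∈ B, key x < key b) :
    PySem.List.insertBy (fun a b => decide (key a < key b)) x (A ++ B) = A ++ x :: B := by
  induction A with
  | nil =>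
    cases B with
    | nil => rfl
    | cons b B' =>
      have : key x < key b := hB b (by simp)
      simp [PySem.List.insertBy, this]
  | cons a A' ih =>
    have hna : ¬ (key x < key a) := hA a (by simp)
    rw [List.cons_append, PySem.List.insertBy]
    simp only [hna, decide_false, Bool.false_eq_true, if_false]
    exact congrArg (a :: ·) (ih (fun a' h => hA a' (by simp [h])))

-- stable sort by an Int key with all keys in [1, M] = concatenation of the key-c groups for c = 1..M
lemma sorted_eq_flatMap_range (l : List (Int × Int)) (M : Int)
    (hb : ∀ p ∈ l, 1 ≤ p.2 ∧ p.2 ≤ M) :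
    PySem.List.sorted l (fun p => p.2) false
      = (PySem.List.pyRange 1 (M + 1)).flatMap (fun c => l.filter (fun p => p.2 == c)) := by
  induction l using List.reverseRecOn with
  | nil => simp [PySem.List.sorted]
  | append_singleton l x ih =>
    have hx := hb x (by simp)
    have hl : ∀ p ∈ l, 1 ≤ p.2 ∧ p.2 ≤ M := fun p h => hb p (by simp [h])
    have hsplit : PySem.List.pyRange 1 (M + 1) 1
        = PySem.List.pyRange 1 (x.2 + 1) 1 ++ PySem.List.pyRange (x.2 + 1) (M + 1) 1 :=
      PySem.List.pyRange_one_append 1 (x.2 + 1) (M + 1) (by omega) (by omega)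
    have hsucc : PySem.List.pyRange 1 (x.2 + 1) 1
        = PySem.List.pyRange 1 x.2 1 ++ [x.2] :=
      PySem.List.pyRange_one_succ_right (by omega)
    have hLHS : PySem.List.sorted (l ++ [x]) (fun p => p.2) false
        = PySem.List.insertBy (fun a b : Int × Int => decide (a.2 < b.2)) x
            (PySem.List.sorted l (fun p => p.2) false) := by
      rw [PySem.List.sorted_eq_foldl_insertBy, PySem.List.sorted_eq_foldl_insertBy,
        List.foldl_append, List.foldl_cons, List.foldl_nil]
    rw [hLHS, ih hl]
    have hA : ∀ a ∈ (PySem.List.pyRange 1 (x.2 + 1) 1).flatMap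
        (fun c => l.filter (fun p => p.2 == c)), ¬ (x.2 < a.2) := by
      intro a ha
      rcases List.mem_flatMap.mp ha with ⟨c, hc, haf⟩
      have hc2 := (PySem.List.mem_pyRange_one).mp hc
      have : a.2 = c := by simpa using (List.mem_filter.mp haf).2
      omega
    have hB : ∀ b ∈ (PySem.List.pyRange (x.2 + 1) (M + 1) 1).flatMap
        (fun c => l.filter (fun p => p.2 == c)), x.2 < b.2 := by
      intro b hbm
      rcases List.mem_flatMap.mp hbm with ⟨c, hc, hbf⟩
      have hc2 := (PySem.List.mem_pyRange_one).mp hc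
      have : b.2 = c := by simpa using (List.mem_filter.mp hbf).2
      omega
    rw [hsplit, List.flatMap_append,
      insertBy_split (fun p : Int × Int => p.2) x _ _ hA hB]
    have hfil : ∀ c : Int, (l ++ [x]).filter (fun p => p.2 == c)
        = l.filter (fun p => p.2 == c) ++ (if x.2 == c then [x] else []) := by
      intro c; rw [List.filter_append]; congr 1
      cases h : x.2 == c <;> simp [List.filter, h]
    rw [List.flatMap_append]
    have hleft : (PySem.List.pyRange 1 (x.2 + 1) 1).flatMap
          (fun c => (l ++ [x]).filter (fun p => p.2 == c))
        = (PySem.List.pyRange 1 (x.2 + 1) 1).flatMap (fun c => l.filter (fun p => p.2 == c))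
            ++ [x] := by
      rw [hsucc, List.flatMap_append, List.flatMap_append]
      have h1 : (PySem.List.pyRange 1 x.2 1).flatMap (fun c => (l ++ [x]).filter (fun p => p.2 == c))
          = (PySem.List.pyRange 1 x.2 1).flatMap (fun c => l.filter (fun p => p.2 == c)) := by
        apply List.flatMap_congr
        intro c hc
        have hc2 := (PySem.List.mem_pyRange_one).mp hc
        rw [hfil c, if_neg (by simp; omega), List.append_nil]
      have h2 : ([x.2] : List Int).flatMap (fun c => (l ++ [x]).filter (fun p => p.2 == c))
          = ([x.2] : List Int).flatMap (fun c => l.filter (fun p => p.2 == c)) ++ [x] := by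
        simp [List.flatMap]
      rw [h1, h2, List.append_assoc]
    have hright : (PySem.List.pyRange (x.2 + 1) (M + 1) 1).flatMap
          (fun c => (l ++ [x]).filter (fun p => p.2 == c))
        = (PySem.List.pyRange (x.2 + 1) (M + 1) 1).flatMap (fun c => l.filter (fun p => p.2 == c)) := by
      apply List.flatMap_congr
      intro c hc
      have hc2 := (PySem.List.mem_pyRange_one).mp hc
      rw [hfil c, if_neg (by simp; omega), List.append_nil]
    rw [hleft, hright]
    simp [List.append_assoc]

-- B's inner loop over the dict items
lemma inner_fold (items : List (Int × Int)) (c : Int) (out : List Int × List Int) :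
    items.foldl (fun out kn => if kn.2 == c then (out.1 ++ [c], out.2 ++ [kn.1]) else out) out
      = (out.1 ++ (items.filter (fun p => p.2 == c)).map (fun _ => c),
         out.2 ++ (items.filter (fun p => p.2 == c)).map (fun p => p.1)) := by
  induction items generalizing out with
  | nil => simp
  | cons p t ih =>
    rw [List.foldl_cons]
    cases h : (p.2 == c) with
    | false =>
      rw [if_neg (by simp), ih]
      simp [h]
    | true =>
      rw [if_pos rfl, ih]
      simp [h, List.append_assoc]

-- B's outer loop over the frequency range
lemma outer_fold (r : List Int) (items : List (Int × Int)) (out : List Int × List Int) :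
    r.foldl (fun out c =>
        items.foldl (fun out kn => if kn.2 == c then (out.1 ++ [c], out.2 ++ [kn.1]) else out) out)
      out
      = (out.1 ++ r.flatMap (fun c => (items.filter (fun p => p.2 == c)).map (fun _ => c)),
         out.2 ++ r.flatMap (fun c => (items.filter (fun p => p.2 == c)).map (fun p => p.1))) := by
  induction r generalizing out with
  | nil => simp
  | cons c t ih =>
    rw [List.foldl_cons, inner_fold, ih]
    simp [List.append_assoc]

-- ===== VERDICT (by name: the statement is the Claim_ definition above) =====
theorem group_hand_py_spec : Claim_equal_group_hand_py := by
  intro hv _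
  unfold Spec_group_hand_py group_hand_py group_hand_py_alt
  simp only [dictA_eq_counter, PySem.Dict.foldl_insert_getD_add_one_eq_counter]
  set D := PySem.Dict.counter hv with hD
  set maxc := D.values.foldl (fun m n => max m n) 0 with hmax
  have hb : ∀ p ∈ D.items, 1 ≤ p.2 ∧ p.2 ≤ maxc := by
    intro p hp
    refine ⟨?_, ?_⟩
    · rw [hD, PySem.Dict.items_counter] at hp
      rcases List.mem_map.mp hp with ⟨k, hk, rfl⟩
      have hmem : k ∈ hv := (PySem.Set.mem_ofList hv k).mp hk
      have h1 : 0 < hv.count k := List.count_pos_iff.mpr hmem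
      show (1 : Int) ≤ (hv.count k : Int)
      exact_mod_cast h1
    · have hpv : p.2 ∈ D.values := by
        simp only [PySem.Dict.values]
        exact List.mem_map.mpr ⟨p, hp, rfl⟩
      exact (PySem.List.le_foldl_max D.values 0).2 p.2 hpv
  rw [sorted_eq_flatMap_range D.items maxc hb, outer_fold]
  refine congrArg₂ Prod.mk ?_ ?_
  · rw [List.map_flatMap, List.nil_append]
    apply List.flatMap_congr
    intro c _
    apply List.map_congr_left
    intro p hp
    simpa using (List.mem_filter.mp hp).2
  · rw [List.map_flatMap, List.nil_append]
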